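-- pv_equiv track=rewrite | github.com/UUDigitalHumanitieslab/sasta | backend/analysis/query/external/stringfunctions.py | dehyphenate
-- ===== SOURCE A (Python) =====
-- hyphen = '-'
--
-- def dehyphenate(word):
--     results = []
--     if len(word) == 0:
--         results = ['']
--     else:
--         head = word[0:1]
--         tail = word[1:]
--         if head == hyphen:
--             # newresult = head + tail
--             # results.append(newresult)
--             rightresults = dehyphenate(tail)
--             for rightresult in rightresults:
--                 newresult = head + rightresult
--                 results.append(newresult)
--                 newresult = rightresult
--                 results.append(newresult)
--         else:
--             tailresults = dehyphenate(tail)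
--             for tailresult in tailresults:
--                 newresult = head + tailresult
--                 results.append(newresult)
--     return results
-- ===== SOURCE B (Python) =====
-- def dehyphenate(word):
--     # Split once on '-' and enumerate all 2**gaps keep/drop choices iteratively:
--     # each later gap is more significant, matching the recursion's output order.
--     parts = word.split('-')
--     results = [parts[0]]
--     for part in parts[1:]:
--         results = [r + '-' + part for r in results] + [r + part for r in results]
--     return results
-- ===== Notes on version B (the rewrite author's own statement) =====
-- stated objective: idiomatic
-- what changed: Replaces A's per-character recursion (branching at each hyphen) by a single split('-') followed by an iterative fold that extends all variants part by part with keep/drop separator choices.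
import Mathlib
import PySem

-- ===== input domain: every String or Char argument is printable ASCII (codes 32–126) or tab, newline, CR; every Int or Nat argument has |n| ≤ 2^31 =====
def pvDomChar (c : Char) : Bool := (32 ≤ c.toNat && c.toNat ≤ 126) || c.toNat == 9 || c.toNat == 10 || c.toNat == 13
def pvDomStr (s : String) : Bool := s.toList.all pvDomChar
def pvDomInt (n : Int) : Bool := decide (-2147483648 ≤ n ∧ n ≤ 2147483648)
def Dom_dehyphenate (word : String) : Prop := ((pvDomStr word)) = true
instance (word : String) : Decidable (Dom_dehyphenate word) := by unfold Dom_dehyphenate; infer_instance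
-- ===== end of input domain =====

-- B replaces A's per-character recursion by split('-') plus an iterative keep/drop fold over the parts (idiomatic; same output, order and duplicates included).

-- ===== PORT A =====
-- A's recursion, transliterated on the code-point list: empty word -> ['']; a leading
-- hyphen appends keep/drop variants of each recursive result; any other character is
-- prepended to each recursive result (the for-loops with results.append are foldls).
def dehyphAuxA : List Char → List (List Char)
  | [] => [[]]
  | c :: tail =>
    if c = '-' then
      (dehyphAuxA tail).foldl (fun results r => (results ++ [('-' :: r)]) ++ [r]) []
    else
      (dehyphAuxA tail).foldl (fun results r => results ++ [c :: r]) []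

def dehyphenate (word : String) : List String :=
  (dehyphAuxA word.toList).map String.mk

-- ===== PORT B =====
-- Source B on the code-point list: parts = word.split('-'); results = [parts[0]];
-- for part in parts[1:]: results = [r+'-'+part for r in results] + [r+part for r in results]
def dehyphAuxB (chars : List Char) : List (List Char) :=
  let parts := PySem.Chars.splitOn chars ['-']
  let init := [PySem.List.pyGetD parts 0 []]
  (PySem.List.slice parts (some 1) none).foldl
    (fun results part =>
      results.map (fun r => (r ++ ['-']) ++ part) ++ results.map (fun r => r ++ part))
    init

def dehyphenate_alt (word : String) : List String :=
  (dehyphAuxB word.toList).map String.mk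

-- ===== PRECONDITION & SPEC =====
def Spec_dehyphenate (word : String) (out : List String) : Prop := out = dehyphenate_alt word
instance (word : String) (out : List String) : Decidable (Spec_dehyphenate word out) := by unfold Spec_dehyphenate; infer_instance

-- ===== CLAIM (what is proved, stated in full; the proofs are below) =====
def Claim_equal_dehyphenate : Prop := ∀ (word : String), Dom_dehyphenate word → Spec_dehyphenate word (dehyphenate word)

-- ===== LEMMAS AND PROOFS =====

-- split on '-' , head-recursive form
def splitH : List Char → List (List Char)
  | [] => [[]]
  | c :: t =>
    let r := splitH t
    if c = '-' then [] :: r else (c :: r.headD []) :: r.tail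

-- common intermediate: all keep/drop recombinations of the parts, later gaps most significant
def combosC : List (List Char) → List (List Char)
  | [] => [[]]
  | [p] => [p]
  | p :: q :: ps => (combosC (q :: ps)).flatMap (fun r => [p ++ '-' :: r, p ++ r])

lemma splitH_ne_nil (l : List Char) : splitH l ≠ [] := by
  cases l with
  | nil => simp [splitH]
  | cons c t => simp only [splitH]; split <;> simp

lemma go_eq (fuel : Nat) :
    ∀ (l cur : List Char) (acc : List (List Char)), l.length < fuel →
      PySem.Chars.splitOn.go ['-'] fuel l cur acc =
        acc.reverse ++ (cur.reverse ++ (splitH l).headD []) :: (splitH l).tail := by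
  induction fuel with
  | zero => intro l cur acc h; omega
  | succ f ih =>
    intro l cur acc h
    cases l with
    | nil =>
      simp [PySem.Chars.splitOn.go, splitH]
    | cons c rest =>
      have hlen : rest.length < f := by simp [List.length_cons] at h; omega
      by_cases hc : c = '-'
      · subst hc
        have hpre : List.isPrefixOf ['-'] ('-' :: rest) = true := by
          simp [List.isPrefixOf]
        rw [PySem.Chars.splitOn.go]
        simp only [hpre, if_pos, List.length_cons, List.length_nil, List.drop_succ_cons,
          List.drop_zero]
        rw [ih rest [] (cur.reverse :: acc) hlen]
        cases hrs : splitH rest with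
        | nil => exact absurd hrs (splitH_ne_nil rest)
        | cons p ps => simp [splitH, hrs]
      · have hpre : List.isPrefixOf ['-'] (c :: rest) = false := by
          simp [List.isPrefixOf]
          exact fun hccontra => hc hccontra.symm
        -- (c ≠ '-' makes the one-char prefix test fail)
        rw [PySem.Chars.splitOn.go]
        simp only [hpre, Bool.false_eq_true, if_false]
        rw [ih rest (c :: cur) acc hlen]
        cases hrs : splitH rest with
        | nil => exact absurd hrs (splitH_ne_nil rest)
        | cons p ps => simp [splitH, hrs, hc]

lemma splitOn_eq (l : List Char) : PySem.Chars.splitOn l ['-'] = splitH l := by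
  have h := go_eq (l.length + 1) l [] [] (by omega)
  have hne := splitH_ne_nil l
  rw [PySem.Chars.splitOn]
  rw [h]
  cases hs : splitH l with
  | nil => exact absurd hs hne
  | cons p ps => simp

lemma combosC_cons (c : Char) (p : List Char) (ps : List (List Char)) :
    combosC ((c :: p) :: ps) = (combosC (p :: ps)).map (fun r => c :: r) := by
  cases ps with
  | nil => simp [combosC]
  | cons q ps' => simp [combosC, List.map_flatMap]

lemma auxA_eq_combos (l : List Char) : dehyphAuxA l = combosC (splitH l) := by
  induction l with
  | nil => simp [dehyphAuxA, splitH, combosC]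
  | cons c t ih =>
    by_cases hc : c = '-'
    · subst hc
      simp only [dehyphAuxA, splitH, ih]
      have hstep : ∀ (X : List (List Char)),
          X.foldl (fun results r => (results ++ [('-' :: r)]) ++ [r]) [] =
            X.flatMap (fun r => ['-' :: r, r]) := by
        intro X
        have h1 : X.foldl (fun results r => (results ++ [('-' :: r)]) ++ [r]) [] =
            X.foldl (fun acc r => acc ++ ['-' :: r, r]) [] :=
          PySem.List.foldl_congr_mem X _ _ [] (fun acc x _ => by simp)
        rw [h1]
        simpa using PySem.List.foldl_append_eq_flatMap (l := X)
          (g := fun r => [('-' :: r), r]) (acc := [])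
      rw [hstep]
      cases hs : splitH t with
      | nil => exact absurd hs (splitH_ne_nil t)
      | cons p ps => simp [combosC]
    · simp only [dehyphAuxA, if_neg hc, splitH, ih]
      rw [PySem.List.foldl_append_singleton_eq_map]
      cases hs : splitH t with
      | nil => exact absurd hs (splitH_ne_nil t)
      | cons p ps =>
        simp only [List.nil_append, List.headD_cons, List.tail_cons]
        exact (combosC_cons c p ps).symm

lemma combosC_snoc (ps : List (List Char)) : ∀ (p q : List Char),
    combosC ((p :: ps) ++ [q]) =
      (combosC (p :: ps)).map (fun r => (r ++ ['-']) ++ q) ++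
        (combosC (p :: ps)).map (fun r => r ++ q) := by
  induction ps with
  | nil => intro p q; simp [combosC]
  | cons s ps' ih =>
    intro p q
    have h1 : combosC ((p :: s :: ps') ++ [q]) =
        (combosC ((s :: ps') ++ [q])).flatMap (fun r => [p ++ '-' :: r, p ++ r]) := by
      cases ps' <;> simp [combosC]
    rw [h1, ih s q]
    simp [combosC, List.flatMap_append, List.flatMap_map, List.map_flatMap,
      List.append_assoc]

lemma foldB_eq (ps : List (List Char)) : ∀ (p : List Char),
    ps.foldl
      (fun results part =>
        results.map (fun r => (r ++ ['-']) ++ part) ++ results.map (fun r => r ++ part))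
      [p] = combosC (p :: ps) := by
  induction ps using List.reverseRecOn with
  | nil => intro p; simp [combosC]
  | append_singleton ps q ih =>
    intro p
    rw [List.foldl_append, ih p]
    simp only [List.foldl_cons, List.foldl_nil]
    exact (combosC_snoc ps p q).symm

lemma auxB_eq_combos (l : List Char) : dehyphAuxB l = combosC (splitH l) := by
  cases hs : splitH l with
  | nil => exact absurd hs (splitH_ne_nil l)
  | cons p ps =>
    have hslice : PySem.List.slice (p :: ps) (some 1) none = ps := by
      simp [PySem.List.slice]
    have hget : PySem.List.pyGetD (p :: ps) 0 ([] : List Char) = p := by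
      simp [PySem.List.pyGetD]
    simp only [dehyphAuxB, splitOn_eq, hs, hslice, hget]
    exact foldB_eq ps p

-- ===== VERDICT (by name: the statement is the Claim_ definition above) =====
theorem dehyphenate_spec : Claim_equal_dehyphenate := by
  intro word _
  unfold Spec_dehyphenate dehyphenate dehyphenate_alt
  rw [auxA_eq_combos, auxB_eq_combos]
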